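-- pv_equiv track=rewrite | github.com/tmdt-buw/gideon-core | guidance/recurring_pattern.py | search_for_pattern_in_all_states
-- ===== SOURCE A (Python) =====
-- def search_for_pattern_in_all_states(pattern, states):
--     len_s = len(pattern)
--     pattern_in_all_states = []
--     for state in states:
--         pattern_in_state_list = []
--         for i in range(len(state) - len_s + 1):
--             tmp_pattern = state[i:i + len_s]
--             pattern_in_state_list.append(pattern == tmp_pattern)
--             _for_debugging = 1
--         pattern_in_all_states.append(any(pattern_in_state_list))
--     return pattern_in_all_states
-- ===== SOURCE B (Python) =====
-- def _occurs(pattern, state):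
--     # suffix scan with early exit instead of materialising every window comparison
--     while True:
--         if state[:len(pattern)] == pattern:
--             return True
--         if not state:
--             return False
--         state = state[1:]
--
--
-- def search_for_pattern_in_all_states(pattern, states):
--     return [_occurs(pattern, state) for state in states]
-- ===== Notes on version B (the rewrite author's own statement) =====
-- stated objective: alternative
-- what changed: B replaces A's per-state index loop that materialises a full list of window comparisons and then applies any() with a recursive suffix scan: check whether the pattern is a prefix of the current suffix, return True immediately on a match, otherwise recurse on the tail.
import Mathlib
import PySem

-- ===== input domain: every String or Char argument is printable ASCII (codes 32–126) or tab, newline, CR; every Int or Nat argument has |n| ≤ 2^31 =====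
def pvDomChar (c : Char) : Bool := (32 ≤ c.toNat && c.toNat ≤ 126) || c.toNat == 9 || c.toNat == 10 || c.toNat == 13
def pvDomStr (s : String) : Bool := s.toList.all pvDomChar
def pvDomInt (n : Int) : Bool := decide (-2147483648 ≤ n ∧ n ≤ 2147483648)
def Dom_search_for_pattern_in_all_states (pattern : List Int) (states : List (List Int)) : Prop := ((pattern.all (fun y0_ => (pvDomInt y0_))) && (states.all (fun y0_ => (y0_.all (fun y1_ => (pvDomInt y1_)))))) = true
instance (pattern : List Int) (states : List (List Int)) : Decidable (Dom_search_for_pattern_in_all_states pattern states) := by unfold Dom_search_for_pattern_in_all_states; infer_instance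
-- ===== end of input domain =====

-- B: per state, a recursive suffix scan (prefix check, early exit, recurse on the tail)
-- replaces A's full list of window comparisons followed by any() (objective: alternative).

-- ===== PORT A =====
def search_for_pattern_in_all_states (pattern : List Int) (states : List (List Int)) : List Bool :=
  let len_s : Int := pattern.length
  states.foldl (fun pattern_in_all_states state =>
    let pattern_in_state_list :=
      (PySem.List.pyRange 0 ((state.length : Int) - len_s + 1) 1).foldl
        (fun acc i =>
          let tmp_pattern := PySem.List.slice state (some i) (some (i + len_s))
          acc ++ [decide (pattern = tmp_pattern)]) ([] : List Bool)
    pattern_in_all_states ++ [pattern_in_state_list.any id]) []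

-- ===== PORT B =====
def pvOccurs (pattern : List Int) (state : List Int) : Bool :=
  if state.take pattern.length = pattern then true
  else
    match state with
    | [] => false
    | _ :: t => pvOccurs pattern t

def search_for_pattern_in_all_states_alt (pattern : List Int) (states : List (List Int)) : List Bool :=
  states.map (pvOccurs pattern)

-- ===== PRECONDITION & SPEC =====
def Spec_search_for_pattern_in_all_states (pattern : List Int) (states : List (List Int)) (out : List Bool) : Prop := out = search_for_pattern_in_all_states_alt pattern states
instance (pattern : List Int) (states : List (List Int)) (out : List Bool) : Decidable (Spec_search_for_pattern_in_all_states pattern states out) := by unfold Spec_search_for_pattern_in_all_states; infer_instance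

-- ===== CLAIM (what is proved, stated in full; the proofs are below) =====
def Claim_equal_search_for_pattern_in_all_states : Prop := ∀ (pattern : List Int) (states : List (List Int)), Dom_search_for_pattern_in_all_states pattern states → Spec_search_for_pattern_in_all_states pattern states (search_for_pattern_in_all_states pattern states)

-- ===== LEMMAS AND PROOFS =====

-- A's inner loop for one state equals B's suffix scan.
lemma inner_eq (p : List Int) : ∀ (s : List Int),
    ((PySem.List.pyRange 0 ((s.length : Int) - (p.length : Int) + 1) 1).map
      (fun i => decide (p = PySem.List.slice s (some i) (some (i + (p.length : Int)))))).any id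
    = pvOccurs p s := by
  intro s
  induction s with
  | nil =>
    by_cases hm : p = []
    · subst hm; simp [pvOccurs, PySem.List.pyRange_one, PySem.List.slice]
    · rw [PySem.List.pyRange_one_eq_nil (by
        have : 0 < p.length := List.length_pos_iff.mpr hm; simp; omega)]
      simp [pvOccurs, hm]
  | cons c t ih =>
    by_cases h : p.length ≤ t.length + 1
    · rw [PySem.List.pyRange_one_cons (by simp; omega)]
      simp only [List.map_cons, List.any_cons, id]
      have hhead : PySem.List.slice (c :: t) (some 0) (some (0 + (p.length : Int)))
          = (c :: t).take p.length := by
        rw [zero_add]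
        simp [PySem.List.slice_to_natCast]
      have htail : (PySem.List.pyRange (0+1) ((↑(c :: t).length : Int) - (p.length : Int) + 1) 1).map
            (fun i => decide (p = PySem.List.slice (c :: t) (some i) (some (i + (p.length : Int)))))
          = (PySem.List.pyRange 0 ((t.length : Int) - (p.length : Int) + 1) 1).map
            (fun i => decide (p = PySem.List.slice t (some i) (some (i + (p.length : Int))))) := by
        rw [PySem.List.pyRange_one, PySem.List.pyRange_one]
        have hlen : (((c :: t).length : Int) - (p.length : Int) + 1 - (0 + 1)).toNat
            = ((t.length : Int) - (p.length : Int) + 1 - 0).toNat := by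
          simp; omega
        rw [hlen, List.map_map, List.map_map]
        apply List.map_congr_left
        intro k _
        simp only [Function.comp]
        congr 1
        have e1 : (0 : Int) + 1 + (k : Int) = ((k + 1 : Nat) : Int) := by push_cast; ring
        have e2 : (0 : Int) + (k : Int) = ((k : Nat) : Int) := by ring
        rw [e1, e2, PySem.List.slice_natCast_add, PySem.List.slice_natCast_add]
        simp
      rw [hhead, htail, ih]
      rw [pvOccurs]
      by_cases hp : (c :: t).take p.length = p
      · simp [hp]
      · have : ¬ (p = (c :: t).take p.length) := fun e => hp e.symm
        simp [hp, this]
    · rw [PySem.List.pyRange_one_eq_nil (by simp; omega)]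
      rw [pvOccurs]
      have h1 : ¬ ((c :: t).take p.length = p) := by
        intro e
        have := congrArg List.length e
        simp at this
        omega
      simp only [h1, if_false]
      rw [← ih]
      rw [PySem.List.pyRange_one_eq_nil (by simp; omega)]
      simp

lemma inner_foldl_eq (p s : List Int) :
    ((PySem.List.pyRange 0 ((s.length : Int) - (p.length : Int) + 1) 1).foldl
      (fun acc i =>
        let tmp_pattern := PySem.List.slice s (some i) (some (i + (p.length : Int)))
        acc ++ [decide (p = tmp_pattern)]) ([] : List Bool)).any id
    = pvOccurs p s := by
  rw [PySem.List.foldl_append_singleton_eq_map]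
  simpa using inner_eq p s

-- ===== VERDICT (by name: the statement is the Claim_ definition above) =====
theorem search_for_pattern_in_all_states_spec : Claim_equal_search_for_pattern_in_all_states := by
  intro pattern states _
  unfold Spec_search_for_pattern_in_all_states search_for_pattern_in_all_states search_for_pattern_in_all_states_alt
  rw [PySem.List.foldl_append_singleton_eq_map]
  simp only [List.nil_append]
  apply List.map_congr_left
  intro s _
  exact inner_foldl_eq pattern s
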